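-- pv_equiv track=rewrite | github.com/Hiissu/duoduo-resume | backend/base/api/views/validation.py | is_learned_valid
-- ===== SOURCE A (Python) =====
-- def is_request_valid(request_data, key_list):
--     if not isinstance(request_data, dict):
--         return False
--     elif (len(request_data.keys()) > len(key_list)) or (
--         any(key not in request_data for key in key_list)
--     ):
--         return False
--     else:
--         return True
--
-- def is_learned_valid(learned_list):
--     if learned_list is None:
--         return True
--     elif len(learned_list) > 20:
--         return False
--
--     ids_exist = []
--     key_list = ("id", "writing", "reading", "speaking", "listening")
--
--     for learn_elem in learned_list:
--         if not is_request_valid(learn_elem, key_list):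
--             return False
--
--         id = learn_elem["id"]
--         if (not isinstance(id, int)) or (id in ids_exist):
--             return False
--         else:
--             if id < 0:
--                 return False
--             else:
--                 ids_exist.append(id)
--
--         writing = learn_elem["writing"]
--         reading = learn_elem["reading"]
--         speaking = learn_elem["speaking"]
--         listening = learn_elem["listening"]
--
--         if (
--             (not isinstance(writing, int))
--             or (not isinstance(reading, int))
--             or (not isinstance(speaking, int))
--             or (not isinstance(listening, int))
--         ):
--             return False
--         elif writing < 0 or reading < 0 or speaking < 0 or listening < 0:
--             return False
--
--     return True
-- ===== SOURCE B (Python) =====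
-- def is_learned_valid(learned_list):
--     if learned_list is None:
--         return True
--     if len(learned_list) > 20:
--         return False
--     keys = ("id", "writing", "reading", "speaking", "listening")
--     for elem in learned_list:
--         if not isinstance(elem, dict) or len(elem) != 5:
--             return False
--         if any(k not in elem for k in keys):
--             return False
--         if any(not isinstance(elem[k], int) or elem[k] < 0 for k in keys):
--             return False
--     ids = [elem["id"] for elem in learned_list]
--     return len(set(ids)) == len(ids)
-- ===== Notes on version B (the rewrite author's own statement) =====
-- stated objective: simpler
-- what changed: B validates each element independently (shape + five non-negative int fields) and replaces A's interleaved growing ids_exist list with one final uniqueness pass len(set(ids)) == len(ids) after the loop.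
import Mathlib
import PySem

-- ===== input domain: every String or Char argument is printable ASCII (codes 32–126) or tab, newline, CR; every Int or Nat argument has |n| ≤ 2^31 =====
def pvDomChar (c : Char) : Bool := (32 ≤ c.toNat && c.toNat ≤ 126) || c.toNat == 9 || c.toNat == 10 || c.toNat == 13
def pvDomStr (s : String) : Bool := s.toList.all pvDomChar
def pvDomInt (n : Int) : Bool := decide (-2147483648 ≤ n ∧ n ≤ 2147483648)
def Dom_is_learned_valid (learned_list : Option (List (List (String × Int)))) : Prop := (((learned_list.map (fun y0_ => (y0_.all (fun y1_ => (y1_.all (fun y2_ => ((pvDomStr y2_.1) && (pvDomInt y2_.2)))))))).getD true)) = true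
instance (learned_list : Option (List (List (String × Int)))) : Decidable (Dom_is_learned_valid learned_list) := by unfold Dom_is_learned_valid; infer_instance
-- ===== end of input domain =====

-- B replaces A's interleaved ids_exist duplicate tracking with per-element validation plus one
-- final set-based uniqueness check; objective: simpler.

-- ===== PORT A =====
-- key_list = ("id", "writing", "reading", "speaking", "listening")
def pvKeyList : List String := ["id", "writing", "reading", "speaking", "listening"]

-- is_request_valid(request_data, key_list); 'isinstance(request_data, dict)' is identically
-- true under the typed domain (every element is a dict[str, int]).
def pvIsRequestValid (d : PySem.Dict String Int) : Bool :=
  if d.size > pvKeyList.length || pvKeyList.any (fun k => !(d.contains k)) then false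
  else true

-- the 'for learn_elem in learned_list' loop with its growing ids_exist accumulator;
-- the isinstance(..., int) checks are identically true under the typed domain (values are int).
def pvLoopA : List (List (String × Int)) → List Int → Bool
  | [], _ => true
  | e :: rest, ids =>
    if !(pvIsRequestValid (PySem.Dict.ofList e)) then false
    else
      let id := (PySem.Dict.ofList e).getD "id" 0
      if ids.contains id then false
      else if id < 0 then false
      else
        let w := (PySem.Dict.ofList e).getD "writing" 0
        let r := (PySem.Dict.ofList e).getD "reading" 0
        let s := (PySem.Dict.ofList e).getD "speaking" 0
        let li := (PySem.Dict.ofList e).getD "listening" 0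
        if w < 0 || r < 0 || s < 0 || li < 0 then false
        else pvLoopA rest (ids ++ [id])

def is_learned_valid (learned_list : Option (List (List (String × Int)))) : Bool :=
  match learned_list with
  | none => true
  | some xs => if xs.length > 20 then false else pvLoopA xs []

-- ===== PORT B =====
-- keys = ("id", "writing", "reading", "speaking", "listening")
def pvKeysB : List String := ["id", "writing", "reading", "speaking", "listening"]

-- per-element validation of Source B's loop body (order of the three early returns preserved)
def pvElemOkB (e : List (String × Int)) : Bool :=
  if (PySem.Dict.ofList e).size ≠ 5 then false
  else if pvKeysB.any (fun k => !((PySem.Dict.ofList e).contains k)) then false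
  else if pvKeysB.any (fun k => (PySem.Dict.ofList e).getD k 0 < 0) then false
  else true

def pvIdsB (xs : List (List (String × Int))) : List Int :=
  xs.map (fun e => (PySem.Dict.ofList e).getD "id" 0)

def is_learned_valid_alt (learned_list : Option (List (List (String × Int)))) : Bool :=
  match learned_list with
  | none => true
  | some xs =>
    if xs.length > 20 then false
    else if !(xs.all pvElemOkB) then false
    else (PySem.Set.ofList (pvIdsB xs)).length == (pvIdsB xs).length

-- ===== PRECONDITION & SPEC =====
def Spec_is_learned_valid (learned_list : Option (List (List (String × Int)))) (out : Bool) : Prop := out = is_learned_valid_alt learned_list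
instance (learned_list : Option (List (List (String × Int)))) (out : Bool) : Decidable (Spec_is_learned_valid learned_list out) := by unfold Spec_is_learned_valid; infer_instance

-- ===== CLAIM (what is proved, stated in full; the proofs are below) =====
def Claim_equal_is_learned_valid : Prop := ∀ (learned_list : Option (List (List (String × Int)))), Dom_is_learned_valid learned_list → Spec_is_learned_valid learned_list (is_learned_valid learned_list)

-- ===== LEMMAS AND PROOFS =====

-- set(ids) has the distinct elements of ids as a sublist of ids
theorem pv_ofList_sublist (m : List Int) : List.Sublist (PySem.Set.ofList m) m := by
  induction m using List.reverseRecOn with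
  | nil => simp [PySem.Set.ofList_nil]
  | append_singleton xs x ih =>
    rw [PySem.Set.ofList_append_singleton, PySem.Set.add_eq_ite]
    split_ifs with h
    · exact ih.trans (List.sublist_append_left xs [x])
    · exact List.Sublist.append ih (List.Sublist.refl [x])

-- len(set(ids)) == len(ids) is exactly distinctness of ids
theorem pv_setLen_eq_nodup (m : List Int) :
    ((PySem.Set.ofList m).length == m.length) = decide m.Nodup := by
  by_cases h : m.Nodup
  · rw [PySem.Set.ofList_eq_self_of_nodup m h]
    simp [h]
  · simp only [h, decide_false, beq_eq_false_iff_ne, Ne]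
    intro hlen
    exact h ((pv_ofList_sublist m).eq_of_length hlen ▸ PySem.Set.nodup_ofList m)

-- a dict with at most five keys containing the five distinct required keys has exactly five
theorem pv_size_of_contains (e : List (String × Int))
    (hle : (PySem.Dict.ofList e).size ≤ 5)
    (hc : ∀ k ∈ pvKeyList, (PySem.Dict.ofList e).contains k = true) :
    (PySem.Dict.ofList e).size = 5 := by
  have hsub : pvKeyList ⊆ (PySem.Dict.ofList e).keys := by
    intro k hk
    exact (PySem.Dict.contains_iff_mem_keys _ _).mp (hc k hk)
  have hnd : pvKeyList.Nodup := by decide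
  have h5 : pvKeyList.length ≤ (PySem.Dict.ofList e).keys.length :=
    (List.subperm_of_subset hnd hsub).length_le
  have hkl : pvKeyList.length = 5 := rfl
  have hsz : (PySem.Dict.ofList e).size = (PySem.Dict.ofList e).keys.length := by
    simp [PySem.Dict.size, PySem.Dict.keys]
  omega

-- what A's per-element shape test decides
theorem pv_req_iff (d : PySem.Dict String Int) :
    pvIsRequestValid d = true ↔ d.size ≤ 5 ∧ ∀ k ∈ pvKeyList, d.contains k = true := by
  unfold pvIsRequestValid
  split_ifs with h
  · simp only [Bool.false_eq_true, false_iff, not_and]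
    rw [Bool.or_eq_true, decide_eq_true_eq, List.any_eq_true] at h
    intro hle hcon
    rcases h with hgt | ⟨k, hk, hkc⟩
    · have : pvKeyList.length = 5 := rfl
      omega
    · rw [hcon k hk] at hkc
      simp at hkc
  · simp only [true_iff]
    rw [Bool.or_eq_true, not_or, decide_eq_true_eq, List.any_eq_true] at h
    obtain ⟨h1, h2⟩ := h
    refine ⟨by have : pvKeyList.length = 5 := rfl; omega, ?_⟩
    intro k hk
    by_contra hkc
    exact h2 ⟨k, hk, by simp [Bool.not_eq_true] at hkc ⊢; exact hkc⟩

-- what B's per-element test decides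
theorem pv_elemOk_iff (e : List (String × Int)) :
    pvElemOkB e = true ↔
      (PySem.Dict.ofList e).size = 5 ∧
      (∀ k ∈ pvKeyList, (PySem.Dict.ofList e).contains k = true) ∧
      (∀ k ∈ pvKeyList, 0 ≤ (PySem.Dict.ofList e).getD k 0) := by
  unfold pvElemOkB
  rw [show pvKeysB = pvKeyList from rfl]
  split_ifs with h1 h2 h3
  · simp only [Bool.false_eq_true, false_iff]
    rintro ⟨hs, -, -⟩
    exact h1 hs
  · simp only [Bool.false_eq_true, false_iff]
    rintro ⟨-, hc, -⟩
    rw [List.any_eq_true] at h2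
    obtain ⟨k, hk, hkc⟩ := h2
    rw [hc k hk] at hkc
    simp at hkc
  · simp only [Bool.false_eq_true, false_iff]
    rintro ⟨-, -, hnn⟩
    rw [List.any_eq_true] at h3
    obtain ⟨k, hk, hkv⟩ := h3
    rw [decide_eq_true_eq] at hkv
    exact absurd (hnn k hk) (by omega)
  · simp only [true_iff]
    refine ⟨by omega, ?_, ?_⟩
    · intro k hk
      by_contra hkc
      exact h2 (List.any_eq_true.mpr ⟨k, hk, by simp [Bool.not_eq_true] at hkc ⊢; exact hkc⟩)
    · intro k hk
      by_contra hkv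
      exact h3 (List.any_eq_true.mpr ⟨k, hk, by simp; omega⟩)

-- A's loop equals: every element valid, the collected ids distinct and disjoint from ids
theorem pv_loopA_eq (xs : List (List (String × Int))) : ∀ (ids : List Int),
    pvLoopA xs ids =
      (xs.all pvElemOkB && decide ((pvIdsB xs).Nodup) &&
        decide (∀ i ∈ pvIdsB xs, i ∉ ids)) := by
  induction xs with
  | nil => intro ids; simp [pvLoopA, pvIdsB]
  | cons e rest ih =>
    intro ids
    have hids : pvIdsB (e :: rest) = (PySem.Dict.ofList e).getD "id" 0 :: pvIdsB rest := rfl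
    simp only [pvLoopA, hids, List.all_cons]
    by_cases hrq : pvIsRequestValid (PySem.Dict.ofList e) = true
    · obtain ⟨hle, hc⟩ := (pv_req_iff _).mp hrq
      have hsz := pv_size_of_contains e hle hc
      rw [hrq]
      simp only [Bool.not_true, Bool.false_eq_true, if_false]
      by_cases hdup : ids.contains ((PySem.Dict.ofList e).getD "id" 0) = true
      · rw [if_pos hdup]
        have hmem : (PySem.Dict.ofList e).getD "id" 0 ∈ ids := by simpa using hdup
        have hnall : ¬ (∀ i ∈ (PySem.Dict.ofList e).getD "id" 0 :: pvIdsB rest, i ∉ ids) :=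
          fun hA => hA _ List.mem_cons_self hmem
        rw [decide_eq_false hnall]
        simp
      · rw [if_neg hdup]
        have hnid : (PySem.Dict.ofList e).getD "id" 0 ∉ ids := by simpa using hdup
        by_cases hidneg : (PySem.Dict.ofList e).getD "id" 0 < 0
        · rw [if_pos hidneg]
          have hbad : pvElemOkB e = false := by
            rw [Bool.eq_false_iff, Ne, pv_elemOk_iff]
            rintro ⟨-, -, hnn⟩
            exact absurd (hnn "id" (by decide)) (by omega)
          simp [hbad]
        · rw [if_neg hidneg]
          by_cases hfneg : (((PySem.Dict.ofList e).getD "writing" 0 < 0 ∨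
              (PySem.Dict.ofList e).getD "reading" 0 < 0) ∨
              (PySem.Dict.ofList e).getD "speaking" 0 < 0) ∨
              (PySem.Dict.ofList e).getD "listening" 0 < 0
          · rw [if_pos (by simpa [decide_eq_true_eq] using hfneg)]
            have hbad : pvElemOkB e = false := by
              rw [Bool.eq_false_iff, Ne, pv_elemOk_iff]
              rintro ⟨-, -, hnn⟩
              rcases hfneg with ((h | h) | h) | h
              · exact absurd (hnn "writing" (by decide)) (by omega)
              · exact absurd (hnn "reading" (by decide)) (by omega)
              · exact absurd (hnn "speaking" (by decide)) (by omega)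
              · exact absurd (hnn "listening" (by decide)) (by omega)
            simp [hbad]
          · rw [if_neg (by simpa [decide_eq_true_eq] using hfneg)]
            push_neg at hfneg
            obtain ⟨⟨⟨hw, hr⟩, hs⟩, hl⟩ := hfneg
            have hok : pvElemOkB e = true := by
              rw [pv_elemOk_iff]
              refine ⟨hsz, hc, ?_⟩
              intro k hk
              fin_cases hk <;> omega
            rw [ih, hok]
            have hswap : (PySem.Dict.ofList e).getD "id" 0 ∉ pvIdsB rest ↔
                ∀ i ∈ pvIdsB rest, i ≠ (PySem.Dict.ofList e).getD "id" 0 := by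
              constructor
              · intro h i him he
                exact h (he ▸ him)
              · intro h hm
                exact h _ hm rfl
            simp only [Bool.true_and, List.nodup_cons, List.forall_mem_cons, List.mem_append,
              List.mem_singleton]
            apply Bool.eq_iff_iff.mpr
            simp only [Bool.and_eq_true, decide_eq_true_eq]
            constructor
            · rintro ⟨⟨hall, hnd⟩, hforall⟩
              refine ⟨⟨hall, hswap.mpr (fun i hi he => hforall i hi (Or.inr he)), hnd⟩,
                hnid, fun i hi hin => hforall i hi (Or.inl hin)⟩
            · rintro ⟨⟨hall, hnm, hnd⟩, hnids, hrest⟩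
              refine ⟨⟨hall, hnd⟩, fun i hi => ?_⟩
              rintro (h1 | h2)
              · exact hrest i hi h1
              · exact hswap.mp hnm i hi h2
    · have hrqf : pvIsRequestValid (PySem.Dict.ofList e) = false := Bool.not_eq_true _ |>.mp hrq
      rw [hrqf]
      simp only [Bool.not_false, if_true]
      have hbad : pvElemOkB e = false := by
        rw [Bool.eq_false_iff, Ne, pv_elemOk_iff]
        rintro ⟨hs, hcon, -⟩
        exact hrq ((pv_req_iff _).mpr ⟨by omega, hcon⟩)
      simp [hbad]

-- ===== VERDICT (by name: the statement is the Claim_ definition above) =====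
theorem is_learned_valid_spec : Claim_equal_is_learned_valid := by
  intro learned_list _
  unfold Spec_is_learned_valid
  cases learned_list with
  | none => rfl
  | some xs =>
    simp only [is_learned_valid, is_learned_valid_alt]
    by_cases hlen : xs.length > 20
    · simp [hlen]
    · rw [if_neg hlen, if_neg hlen, pv_loopA_eq xs []]
      rcases hall : xs.all pvElemOkB with _ | _
      · simp
      · simp only [Bool.not_true, Bool.false_eq_true, if_false, Bool.true_and]
        rw [pv_setLen_eq_nodup]
        simp
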